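-- pv_equiv track=rewrite | github.com/aicorein/huffman | src/main.py | normalize_codes
-- ===== SOURCE A (Python) =====
-- def normalize_codes(code_map: dict[int, str]) -> dict[int, str]:
--     """
--     规范化编码表为“范式哈夫曼编码”
--
--     :param code_map: 编码表
--     :return: 规范化后的编码表
--     """
--     srt_pairs = sorted(code_map.items(), key=lambda x: len(x[1]), reverse=False)
--     len_pairs = [(k, len(v)) for k, v in srt_pairs]
--     pairs: list[tuple[int, int, int]] = []
--
--     i = len_pairs.pop(0)
--     symbol = i[0]
--     val = 0
--     code_len = i[1]
--     pairs.append((symbol, val, code_len))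
--
--     for symbol, code_len in len_pairs:
--         pre_val = pairs[-1][1]
--         pre_len = pairs[-1][2]
--
--         if code_len == pre_len:
--             pairs.append((symbol, pre_val + 1, code_len))
--         else:
--             pairs.append((symbol, (pre_val + 1) << (code_len - pre_len), code_len))
--
--     seq_pairs: dict[int, str] = {}
--     for symbol, val, code_len in pairs:
--         bin_str = bin(val)[2:]
--         assert len(bin_str) <= code_len
--         bin_str = bin_str.rjust(code_len, "0")
--         seq_pairs[symbol] = bin_str
--
--     return seq_pairs
-- ===== SOURCE B (Python) =====
-- def normalize_codes(code_map: dict[int, str]) -> dict[int, str]: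
--     """Canonical Huffman normalization: each symbol's code value is computed
--     directly as the Kraft prefix sum sum_{i<j} 2**(L_j - L_i) over the
--     length-sorted symbols, instead of chaining from the previous entry."""
--     pairs = sorted(code_map.items(), key=lambda x: len(x[1]))
--     result: dict[int, str] = {}
--     for j, (symbol, code) in enumerate(pairs):
--         code_len = len(code)
--         val = sum(1 << (code_len - len(pairs[i][1])) for i in range(j))
--         result[symbol] = bin(val)[2:].rjust(code_len, "0")
--     return result
-- ===== Notes on version B (the rewrite author's own statement) =====
-- stated objective: alternative
-- what changed: B replaces A's three-pass pipeline (pop/chain each value from the previous triple via (pre_val+1)<<(len-pre_len), then a second formatting loop) by a single pass that computes every symbol's canonical value independently as the closed-form Kraft prefix sum sum_{i<j} 2**(L_j-L_i) and formats it immediately.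
import Mathlib
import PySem

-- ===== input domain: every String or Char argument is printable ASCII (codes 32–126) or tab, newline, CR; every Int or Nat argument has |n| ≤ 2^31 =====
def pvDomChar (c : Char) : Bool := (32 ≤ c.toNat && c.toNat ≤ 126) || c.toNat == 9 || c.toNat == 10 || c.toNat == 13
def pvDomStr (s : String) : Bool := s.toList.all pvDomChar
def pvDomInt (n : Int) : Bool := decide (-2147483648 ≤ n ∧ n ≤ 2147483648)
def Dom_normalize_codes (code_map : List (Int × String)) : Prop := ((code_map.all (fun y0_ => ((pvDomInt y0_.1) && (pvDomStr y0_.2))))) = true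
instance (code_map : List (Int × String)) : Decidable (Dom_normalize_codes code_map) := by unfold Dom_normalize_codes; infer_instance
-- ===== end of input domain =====

-- B computes each canonical code value independently as a closed-form Kraft prefix sum in one pass,
-- instead of A's chained previous-triple recurrence over three passes (alternative decomposition, not faster).


-- shared formatting helper: bin(val)[2:].rjust(code_len, "0"), char-exact
-- (rjust with fill "0" left-pads with '0' up to the width; a non-positive width pads nothing, like Python)
def pyFmtCode (val : Int) (code_len : Int) : String :=
  let bs := PySem.List.slice (PySem.Int.toBinChars0b val) (some 2) none
  String.ofList (List.replicate (code_len.toNat - bs.length) '0' ++ bs)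

-- ===== PORT A =====
def normalize_codes (code_map : List (Int × String)) : List (Int × String) :=
  let srt_pairs := PySem.List.sorted ((PySem.Dict.ofList code_map).items) (fun x => PySem.Str.len x.2) false
  let len_pairs := srt_pairs.map (fun p => (p.1, PySem.Str.len p.2))
  match len_pairs with
  | [] => []  -- `len_pairs.pop(0)` raises IndexError here (outside Pre_)
  | i :: len_pairs =>
    let symbol := i.1
    let val : Int := 0
    let code_len := i.2
    let pairs : List (Int × Int × Int) := [] ++ [(symbol, val, code_len)]
    let pairs := len_pairs.foldl (fun (pairs : List (Int × Int × Int)) p =>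
      -- pairs[-1]: `pairs` is never empty, so pyGet? is always some and the default is never used
      let last := (PySem.List.pyGet? pairs (-1)).getD (0, 0, 0)
      let pre_val := last.2.1
      let pre_len := last.2.2
      if p.2 == pre_len then pairs ++ [(p.1, pre_val + 1, p.2)]
      else
        -- Python `<<`: the shift amount code_len - pre_len is always > 0 here (list sorted by length),
        -- so `.toNat` is exact
        pairs ++ [(p.1, (pre_val + 1) <<< (p.2 - pre_len).toNat, p.2)]) pairs
    -- the `assert` only raises (outside Pre_); it does not change any computed value
    let seq_pairs := pairs.foldl (fun d t => PySem.Dict.insert d t.1 (pyFmtCode t.2.1 t.2.2)) PySem.Dict.empty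
    seq_pairs.items

-- ===== PORT B =====
def normalize_codes_alt (code_map : List (Int × String)) : List (Int × String) :=
  let pairs := PySem.List.sorted ((PySem.Dict.ofList code_map).items) (fun x => PySem.Str.len x.2) false
  let result := (PySem.List.enumerate pairs).foldl (fun result jp =>
      let code_len := PySem.Str.len jp.2.2
      -- Python `<<` and `pairs[i]`: 0 ≤ i < j ≤ len(pairs) and the list is sorted by length,
      -- so the index is in range (default never used) and the shift amount is ≥ 0 (`.toNat` exact)
      let val : Int := ((PySem.List.pyRange 0 jp.1 1).map (fun i =>
          (1 : Int) <<< (code_len - PySem.Str.len ((PySem.List.pyGet? pairs i).getD (0, "")).2).toNat)).sum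
      PySem.Dict.insert result jp.2.1 (pyFmtCode val code_len)) PySem.Dict.empty
  result.items

-- ===== PRECONDITION & SPEC =====
-- Pre_ is exactly where the Python A returns normally: a nonempty table (else `len_pairs.pop(0)`
-- raises IndexError), no empty code and Kraft's inequality Σ 2^(maxlen−len) ≤ 2^maxlen
-- (else the `assert len(bin_str) <= code_len` fails).
def Pre_normalize_codes (code_map : List (Int × String)) : Prop :=
  let its := (PySem.Dict.ofList code_map).items
  let lens := its.map (fun p => (PySem.Str.len p.2).toNat)
  let M := lens.foldr max 0
  its ≠ [] ∧ (∀ p ∈ its, p.2 ≠ "") ∧ (lens.map (fun L => (2:Nat) ^ (M - L))).sum ≤ 2 ^ M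
instance (code_map : List (Int × String)) : Decidable (Pre_normalize_codes code_map) := by
  unfold Pre_normalize_codes; infer_instance
def pvWitness_normalize_codes : (List (Int × String)) := [(0, "0"), (1, "10"), (2, "11")]

def Spec_normalize_codes (code_map : List (Int × String)) (out : List (Int × String)) : Prop := out = normalize_codes_alt code_map
instance (code_map : List (Int × String)) (out : List (Int × String)) : Decidable (Spec_normalize_codes code_map out) := by unfold Spec_normalize_codes; infer_instance

-- ===== CLAIM (what is proved, stated in full; the proofs are below) =====
def Claim_equal_normalize_codes : Prop := ∀ (code_map : List (Int × String)), Dom_normalize_codes code_map → Pre_normalize_codes code_map → Spec_normalize_codes code_map (normalize_codes code_map)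

-- ===== LEMMAS AND PROOFS =====

-- canonical value of the next symbol of (sorted) length L after symbols of lengths dl
def sval (dl : List Int) (L : Int) : Int := (dl.map (fun x => (2:Int) ^ (L - x).toNat)).sum

-- the canonical triples for the sorted (symbol, length) list ps after lengths dl
def canon (dl : List Int) : List (Int × Int) → List (Int × Int × Int)
  | [] => []
  | (s, L) :: t => (s, sval dl L, L) :: canon (dl ++ [L]) t

theorem length_canon (dl : List Int) (ps : List (Int × Int)) : (canon dl ps).length = ps.length := by
  induction ps generalizing dl with
  | nil => rfl
  | cons p t ih => cases p; simp [canon, ih]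

theorem getElem_canon (dl : List Int) (ps : List (Int × Int)) (k : Nat) (hk : k < ps.length) :
    (canon dl ps)[k]'(by rw [length_canon]; exact hk)
      = (ps[k].1, sval (dl ++ (ps.map (·.2)).take k) ps[k].2, ps[k].2) := by
  induction ps generalizing dl k with
  | nil => simp at hk
  | cons p t ih =>
    cases p with
    | mk s L =>
      cases k with
      | zero => simp [canon]
      | succ k => simpa [canon] using ih (dl ++ [L]) k (by simpa using hk)



theorem sval_step (dl : List Int) (L L' : Int) (hmem : ∀ x ∈ dl, x ≤ L) (hLL : L ≤ L') :
    sval (dl ++ [L]) L' = (sval dl L + 1) * 2 ^ (L' - L).toNat := by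
  induction dl with
  | nil => simp [sval]
  | cons x xs ih =>
    have hx : x ≤ L := hmem x (by simp)
    have h2 : (L - x).toNat + (L' - L).toNat = (L' - x).toNat := by omega
    have ih' := ih (fun y hy => hmem y (by simp [hy]))
    simp only [sval, List.cons_append, List.map_cons, List.sum_cons] at ih' ⊢
    rw [ih', ← h2, pow_add]
    ring

theorem afold_eq (rest : List (Int × Int)) : ∀ (acc : List (Int × Int × Int)) (dl : List Int) (s0 v L : Int),
    v = sval dl L →
    (∀ x ∈ dl, x ≤ L) → List.Pairwise (· ≤ ·) (L :: rest.map (·.2)) →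
    rest.foldl (fun (pairs : List (Int × Int × Int)) p =>
        if p.2 == ((PySem.List.pyGet? pairs (-1)).getD (0, 0, 0)).2.2 then
          pairs ++ [(p.1, ((PySem.List.pyGet? pairs (-1)).getD (0, 0, 0)).2.1 + 1, p.2)]
        else pairs ++ [(p.1, (((PySem.List.pyGet? pairs (-1)).getD (0, 0, 0)).2.1 + 1) <<< (p.2 - ((PySem.List.pyGet? pairs (-1)).getD (0, 0, 0)).2.2).toNat, p.2)])
      (acc ++ [(s0, v, L)])
    = acc ++ (s0, v, L) :: canon (dl ++ [L]) rest := by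
  induction rest with
  | nil => intro acc dl s0 v L _ _ _; simp [canon]
  | cons q t ih =>
    intro acc dl s0 v L hv hmem hchain
    subst hv
    obtain ⟨s', L'⟩ := q
    rw [List.pairwise_cons] at hchain
    obtain ⟨h1, h2⟩ := hchain
    have hLL : L ≤ L' := h1 _ (by simp)
    have hval : sval (dl ++ [L]) L' = (sval dl L + 1) * 2 ^ (L' - L).toNat :=
      sval_step dl L L' hmem hLL
    simp only [List.foldl_cons]
    rw [PySem.List.pyGet?_neg_one_append_singleton]
    have step_eq : (if (L' == L) = true then (acc ++ [(s0, sval dl L, L)]) ++ [(s', sval dl L + 1, L')]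
        else (acc ++ [(s0, sval dl L, L)]) ++ [(s', (sval dl L + 1) <<< (L' - L).toNat, L')])
        = (acc ++ [(s0, sval dl L, L)]) ++ [(s', sval (dl ++ [L]) L', L')] := by
      by_cases h : L' = L
      · subst h; simp [hval]
      · simp [h, hval, Int.shiftLeft_eq]
    simp only [Option.getD_some]
    rw [step_eq]
    have hmem' : ∀ x ∈ dl ++ [L], x ≤ L' := by
      intro x hx
      rcases List.mem_append.mp hx with h | h
      · exact le_trans (hmem x h) hLL
      · simp at h; omega
    have hchain' : List.Pairwise (· ≤ ·) (L' :: t.map (·.2)) := by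
      simpa using h2
    rw [ih (acc ++ [(s0, sval dl L, L)]) (dl ++ [L]) s' _ L' rfl hmem' hchain']
    simp [canon]

def fmtT (t : Int × Int × Int) : Int × String := (t.1, pyFmtCode t.2.1 t.2.2)
def ins (d : PySem.Dict Int String) (p : Int × String) : PySem.Dict Int String := PySem.Dict.insert d p.1 p.2
def outOf (ts : List (Int × Int × Int)) : List (Int × String) := ((ts.map fmtT).foldl ins PySem.Dict.empty).items

theorem portA_eq (cm : List (Int × String)) :
    normalize_codes cm = outOf (canon []
      ((PySem.List.sorted ((PySem.Dict.ofList cm).items) (fun x => PySem.Str.len x.2) false).map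
        (fun p => (p.1, PySem.Str.len p.2)))) := by
  unfold normalize_codes
  cases hs : PySem.List.sorted ((PySem.Dict.ofList cm).items) (fun x => PySem.Str.len x.2) false with
  | nil => simp [outOf, canon]; rfl
  | cons p rest =>
    have hpw := PySem.List.sorted_map_key_pairwise ((PySem.Dict.ofList cm).items) (fun x => PySem.Str.len x.2)
    rw [hs] at hpw
    simp only [List.map_cons] at hpw
    have hchain : List.Pairwise (· ≤ ·) (PySem.Str.len p.2 :: (rest.map (fun p => (p.1, PySem.Str.len p.2))).map (·.2)) := by
      simpa only [List.map_map, Function.comp] using hpw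
    simp only [List.map_cons]
    rw [afold_eq _ [] [] p.1 0 (PySem.Str.len p.2) rfl (by simp) hchain]
    simp only [List.nil_append]
    have hc : ((p.1, (0:Int), PySem.Str.len p.2) :: canon [PySem.Str.len p.2] (rest.map fun p => (p.1, PySem.Str.len p.2)))
        = canon [] ((p.1, PySem.Str.len p.2) :: rest.map fun p => (p.1, PySem.Str.len p.2)) := by
      simp [canon]; rfl
    rw [hc, outOf, List.foldl_map]
    rfl

theorem bval_eq (l : List (Int × String)) (L : Int) (k : Nat) (hk : k ≤ l.length) :
    ((PySem.List.pyRange 0 (k : Int) 1).map (fun i =>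
        (1 : Int) <<< (L - PySem.Str.len ((PySem.List.pyGet? l i).getD (0, "")).2).toNat)).sum
    = sval (((l.map (fun p => (p.1, PySem.Str.len p.2))).map (·.2)).take k) L := by
  rw [PySem.List.pyRange_zero_natCast, List.map_map]
  unfold sval
  congr 1
  apply List.ext_getElem
  · simp; omega
  · intro n h1 h2
    have hn : n < l.length := by simp at h1; omega
    simp only [Function.comp, List.getElem_map, List.getElem_range, List.getElem_take,
      PySem.List.pyGet?_natCast, List.getElem?_eq_getElem hn, Option.getD_some,
      Int.shiftLeft_eq, one_mul]

theorem payload_eq (l : List (Int × String)) :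
    (canon [] (l.map (fun p => (p.1, PySem.Str.len p.2)))).map fmtT
    = (PySem.List.enumerate l).map (fun jp => (jp.2.1, pyFmtCode
        (((PySem.List.pyRange 0 jp.1 1).map (fun i =>
            (1 : Int) <<< (PySem.Str.len jp.2.2 - PySem.Str.len ((PySem.List.pyGet? l i).getD (0, "")).2).toNat)).sum)
        (PySem.Str.len jp.2.2))) := by
  apply List.ext_getElem
  · simp [length_canon, PySem.List.length_enumerate]
  · intro k h1 h2
    have hk : k < l.length := by
      have := h1; simp [length_canon] at this; exact this
    rw [List.getElem_map, List.getElem_map, PySem.List.getElem_enumerate,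
      getElem_canon [] (l.map (fun p => (p.1, PySem.Str.len p.2))) k (by simpa using hk)]
    simp only [List.getElem_map, fmtT, List.nil_append, zero_add]
    rw [bval_eq l _ k (le_of_lt hk)]

theorem portB_eq (cm : List (Int × String)) :
    normalize_codes_alt cm = outOf (canon []
      ((PySem.List.sorted ((PySem.Dict.ofList cm).items) (fun x => PySem.Str.len x.2) false).map
        (fun p => (p.1, PySem.Str.len p.2)))) := by
  unfold normalize_codes_alt
  rw [outOf, payload_eq, List.foldl_map]
  rfl


-- ===== VERDICT (by name: the statement is the Claim_ definition above) =====
theorem normalize_codes_spec : Claim_equal_normalize_codes := by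
  intro cm _ _
  unfold Spec_normalize_codes
  rw [portA_eq, portB_eq]
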